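-- pv_equiv track=rewrite | github.com/emavgl/oinkoin | scripts/write_translations.py | ordered_merge
-- ===== SOURCE A (Python) =====
-- def ordered_merge(existing: dict, updates: dict, source_order: list[str]) -> dict:
--     """
--     Merge updates into existing dict.
--     New keys are placed at the position they appear in source_order.
--     """
--     merged = dict(existing)
--     for key, value in updates.items():
--         current = merged.get(key, key)
--         if current == key:  # untranslated or missing — safe to write
--             merged[key] = value
--
--     # Re-sort by source order so new keys land in the right position
--     source_index = {k: i for i, k in enumerate(source_order)}
--     return dict(
--         sorted(merged.items(), key=lambda kv: source_index.get(kv[0], len(source_order)))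
--     )
-- ===== SOURCE B (Python) =====
-- def ordered_merge(existing: dict, updates: dict, source_order: list[str]) -> dict:
--     """
--     Merge updates into existing dict, then place keys by bucketing on their
--     source_order position (single pass, no sort): O(n) instead of O(n log n).
--     """
--     merged = {k: (updates[k] if k in updates and v == k else v)
--               for k, v in existing.items()}
--     for k, v in updates.items():
--         if k not in merged:
--             merged[k] = v
--
--     pos = {}
--     for i, k in enumerate(source_order):
--         pos[k] = i
--
--     slots = [None] * len(source_order)
--     rest = []
--     for k, v in merged.items():
--         i = pos.get(k)
--         if i is None:
--             rest.append((k, v))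
--         else:
--             slots[i] = (k, v)
--     return dict([p for p in slots if p is not None] + rest)
-- ===== Notes on version B (the rewrite author's own statement) =====
-- stated objective: alternative
-- what changed: Replaces the sort-by-source-index pass with a single O(n) bucketing pass that drops each merged item into its source_order slot (keys outside source_order appended in insertion order), and builds the merged dict via a comprehension plus an add-missing loop instead of A's conditional-overwrite loop.
import Mathlib
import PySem

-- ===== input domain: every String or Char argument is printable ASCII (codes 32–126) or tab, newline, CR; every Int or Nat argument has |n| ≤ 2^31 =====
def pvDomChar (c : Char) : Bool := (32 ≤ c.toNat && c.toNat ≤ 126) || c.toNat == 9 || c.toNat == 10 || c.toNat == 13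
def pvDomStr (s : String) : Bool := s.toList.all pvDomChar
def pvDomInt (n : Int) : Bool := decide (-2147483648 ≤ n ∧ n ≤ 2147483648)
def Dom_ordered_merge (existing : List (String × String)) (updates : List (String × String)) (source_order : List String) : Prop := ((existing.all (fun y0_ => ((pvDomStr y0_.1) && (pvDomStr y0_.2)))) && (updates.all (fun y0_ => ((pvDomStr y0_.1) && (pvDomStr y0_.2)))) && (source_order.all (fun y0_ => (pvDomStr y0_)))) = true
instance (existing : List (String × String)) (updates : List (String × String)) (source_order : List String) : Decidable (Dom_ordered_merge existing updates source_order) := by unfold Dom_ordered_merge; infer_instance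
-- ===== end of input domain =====

-- B replaces A's sort-by-source-index with a single bucketing pass over source_order slots;
-- equivalence of the RETURN value is proved for all inputs (both functions are total).

-- ===== PORT A =====
def ordered_merge (existing : List (String × String)) (updates : List (String × String)) (source_order : List String) : List (String × String) :=
  let merged := ((PySem.Dict.ofList updates).items).foldl
    (fun m kv => if m.getD kv.1 kv.1 == kv.1 then m.insert kv.1 kv.2 else m)
    (PySem.Dict.ofList existing)
  let sourceIndex := (PySem.List.enumerate source_order 0).foldl
    (fun d p => d.insert p.2 p.1) (PySem.Dict.empty : PySem.Dict String Int)
  (PySem.Dict.ofList (PySem.List.sorted merged.items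
    (fun kv => sourceIndex.getD kv.1 (source_order.length : Int)) false)).items

-- ===== PORT B =====
def ordered_merge_alt (existing : List (String × String)) (updates : List (String × String)) (source_order : List String) : List (String × String) :=
  let upd := PySem.Dict.ofList updates
  let merged0 := ((PySem.Dict.ofList existing).items).foldl
    (fun m kv => m.insert kv.1 (if upd.contains kv.1 && (kv.2 == kv.1) then upd.getD kv.1 kv.2 else kv.2))
    (PySem.Dict.empty : PySem.Dict String String)
  let merged := upd.items.foldl
    (fun m kv => if m.contains kv.1 then m else m.insert kv.1 kv.2) merged0
  let pos := (PySem.List.enumerate source_order 0).foldl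
    (fun d p => d.insert p.2 p.1) (PySem.Dict.empty : PySem.Dict String Int)
  let sr := merged.items.foldl
    (fun (sr : List (Option (String × String)) × List (String × String)) kv =>
      match pos.get? kv.1 with
      | none => (sr.1, sr.2 ++ [kv])
      | some i => (sr.1.set i.toNat (some kv), sr.2))
    (List.replicate source_order.length none, [])
  (PySem.Dict.ofList (sr.1.filterMap id ++ sr.2)).items

-- ===== PRECONDITION & SPEC =====
def Spec_ordered_merge (existing : List (String × String)) (updates : List (String × String)) (source_order : List String) (out : List (String × String)) : Prop := out = ordered_merge_alt existing updates source_order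
instance (existing : List (String × String)) (updates : List (String × String)) (source_order : List String) (out : List (String × String)) : Decidable (Spec_ordered_merge existing updates source_order out) := by unfold Spec_ordered_merge; infer_instance

-- ===== CLAIM (what is proved, stated in full; the proofs are below) =====
def Claim_equal_ordered_merge : Prop := ∀ (existing : List (String × String)) (updates : List (String × String)) (source_order : List String), Dom_ordered_merge existing updates source_order → Spec_ordered_merge existing updates source_order (ordered_merge existing updates source_order)


-- ===== LEMMAS AND PROOFS =====


def pvLkp (l : List (String × String)) (k : String) : Option String :=
  (l.find? (fun p => p.1 == k)).map (·.2)

theorem pvGet?_mk (l : List (String × String)) (k : String) :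
    (PySem.Dict.mk l).get? k = pvLkp l k := by
  induction l with
  | nil => rfl
  | cons h t ih =>
      rw [PySem.Dict.get?_mk_cons]
      by_cases hk : h.1 = k
      · simp [pvLkp, hk]
      · have hbe : (h.1 == k) = false := by simpa using hk
        simp only [pvLkp, List.find?_cons, hbe, cond_false] at *
        exact ih

theorem pvGet?_eq_lkp (d : PySem.Dict String String) (k : String) :
    d.get? k = pvLkp d.items k := pvGet?_mk d.items k

theorem pvLkp_append (l1 l2 : List (String × String)) (k : String) :
    pvLkp (l1 ++ l2) k = (pvLkp l1 k).or (pvLkp l2 k) := by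
  induction l1 with
  | nil => simp [pvLkp]
  | cons h t ih =>
      by_cases hk : h.1 = k
      · simp [pvLkp, List.find?_cons, hk]
      · have hbe : (h.1 == k) = false := by simpa using hk
        simp only [pvLkp, List.cons_append, List.find?_cons, hbe, cond_false] at *
        exact ih

theorem pvLkp_eq_none (l : List (String × String)) (k : String) (h : k ∉ l.map Prod.fst) :
    pvLkp l k = none := by
  unfold pvLkp
  rw [List.find?_eq_none.mpr]
  · rfl
  · intro p hp hbe
    exact h (List.mem_map.mpr ⟨p, hp, by simpa using hbe⟩)

theorem pvLkp_map_keyed (xs : List (String × String)) (g : (String × String) → String) (k : String) :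
    pvLkp (xs.map (fun kv => (kv.1, g kv))) k = (xs.find? (fun p => p.1 == k)).map g := by
  induction xs with
  | nil => rfl
  | cons h t ih =>
      by_cases hk : h.1 = k
      · simp [pvLkp, List.find?_cons, hk]
      · have hbe : (h.1 == k) = false := by simpa using hk
        simp only [pvLkp, List.map_cons, List.find?_cons, hbe, cond_false] at *
        exact ih

theorem pvFind?_of_mem_nodup (xs : List (String × String)) (k w : String)
    (hmem : (k, w) ∈ xs) (hnd : (xs.map Prod.fst).Nodup) :
    xs.find? (fun p => p.1 == k) = some (k, w) := by
  induction xs with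
  | nil => simp at hmem
  | cons h t ih =>
      rcases List.mem_cons.mp hmem with rfl | hmem'
      · simp [List.find?_cons]
      · have hk : h.1 ≠ k := by
          intro hcon
          have : k ∈ t.map Prod.fst := List.mem_map.mpr ⟨(k, w), hmem', rfl⟩
          rw [List.map_cons, List.nodup_cons] at hnd
          exact hnd.1 (hcon ▸ this)
        have hbe : (h.1 == k) = false := by simpa using hk
        rw [List.find?_cons, hbe]
        exact ih hmem' (by rw [List.map_cons, List.nodup_cons] at hnd; exact hnd.2)

theorem pvContains_eq (d : PySem.Dict String String) (k : String) :
    d.contains k = decide (k ∈ d.items.map Prod.fst) := by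
  rw [PySem.Dict.contains_eq_decide_mem_keys]
  rfl

def pvCanon (E : PySem.Dict String String) (l : List (String × String)) : List (String × String) :=
  E.items.map (fun kv => (kv.1, if kv.2 == kv.1 then (pvLkp l kv.1).getD kv.2 else kv.2))
    ++ l.filter (fun kv => E.contains kv.1 = false)

theorem pvCanon_fst (E : PySem.Dict String String) (l : List (String × String)) :
    (pvCanon E l).map Prod.fst
      = E.items.map Prod.fst ++ (l.filter (fun kv => E.contains kv.1 = false)).map Prod.fst := by
  simp [pvCanon]

theorem pvA_merged (E : PySem.Dict String String) (u : List (String × String))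
    (hE : (E.items.map Prod.fst).Nodup) (hu : (u.map Prod.fst).Nodup) :
    (u.foldl (fun m kv => if m.getD kv.1 kv.1 == kv.1 then m.insert kv.1 kv.2 else m) E).items
      = pvCanon E u := by
  induction u using List.reverseRecOn with
  | nil =>
      simp only [List.foldl_nil, pvCanon, List.filter_nil, List.append_nil]
      have : ∀ kv ∈ E.items, (kv.1, if kv.2 == kv.1 then (pvLkp ([] : List (String × String)) kv.1).getD kv.2 else kv.2) = kv := by
        intro kv _
        have hnil : pvLkp ([] : List (String × String)) kv.1 = none := rfl
        rw [hnil, Option.getD_none, ite_self]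
      rw [List.map_congr_left this, List.map_id']
  | append_singleton l p ih =>
      have hl : (l.map Prod.fst).Nodup := by
        rw [List.map_append] at hu
        exact hu.of_append_left
      have hpnotl : p.1 ∉ l.map Prod.fst := by
        rw [List.map_append, List.nodup_append] at hu
        intro hcon
        exact hu.2.2 p.1 hcon p.1 (by simp) rfl
      have ihl := ih hl
      rw [List.foldl_append, List.foldl_cons, List.foldl_nil]
      obtain ⟨k, v⟩ := p
      set M := l.foldl (fun m kv => if m.getD kv.1 kv.1 == kv.1 then m.insert kv.1 kv.2 else m) E with hM
      have hkeysM : M.items.map Prod.fst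
          = E.items.map Prod.fst ++ (l.filter (fun kv => E.contains kv.1 = false)).map Prod.fst := by
        rw [ihl, pvCanon_fst]
      have hknotl : k ∉ l.map Prod.fst := hpnotl
      have hgetD : M.getD k k = (pvLkp (pvCanon E l) k).getD k := by
        rw [PySem.Dict.getD_eq_get?_getD, pvGet?_eq_lkp, ihl]
      by_cases hEc : E.contains k = true
      · -- k is an existing key, with unique entry (k, w)
        have hkE : k ∈ E.items.map Prod.fst := by
          rw [pvContains_eq] at hEc
          exact of_decide_eq_true hEc
        obtain ⟨w, hkv⟩ : ∃ w, (k, w) ∈ E.items := by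
          obtain ⟨kv, hkv, hkvk⟩ := List.mem_map.mp hkE
          refine ⟨kv.2, ?_⟩
          obtain ⟨a, b⟩ := kv
          cases hkvk
          exact hkv
        have hfind : E.items.find? (fun q => q.1 == k) = some (k, w) :=
          pvFind?_of_mem_nodup E.items k w hkv hE
        have hlkpl : pvLkp l k = none := pvLkp_eq_none l k hknotl
        have hlkpC : pvLkp (pvCanon E l) k = some w := by
          rw [pvCanon, pvLkp_append, pvLkp_map_keyed, hfind]
          simp only [Option.map_some, hlkpl]
          by_cases hw : (w == k) = true
          · simp only [hw, if_true, Option.getD_none]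
            rfl
          · simp only [hw]
            simp
        have hcond : (M.getD k k == k) = (w == k) := by rw [hgetD, hlkpC]; rfl
        have hfilterp : ([((k : String), (v : String))].filter (fun kv => E.contains kv.1 = false)) = [] := by
          simp [hEc]
        by_cases hw : (w == k) = true
        · -- untranslated existing key: overwrite in place
          rw [if_pos (by rw [hcond]; exact hw)]
          have hMc : M.contains k = true := by
            rw [pvContains_eq, hkeysM]
            exact decide_eq_true (List.mem_append_left _ hkE)
          rw [PySem.Dict.items_insert_of_contains (h := hMc), ihl]
          simp only [pvCanon, List.map_append, List.map_map, List.filter_append, hfilterp, List.append_nil]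
          congr 1
          · apply List.map_congr_left
            intro kv hkv'
            simp only [Function.comp_apply]
            by_cases hkk : kv.1 = k
            · have hkv2 : (k, kv.2) ∈ E.items := by
                obtain ⟨a, b⟩ := kv
                cases hkk
                exact hkv'
              have h1 := pvFind?_of_mem_nodup E.items k kv.2 hkv2 hE
              rw [hfind] at h1
              have hw2 : kv.2 = w := congrArg Prod.snd (Option.some.inj h1).symm
              have hkv_eq : kv = (k, w) := Prod.ext hkk hw2
              rw [hkv_eq]
              have hwk : w = k := by simpa using hw
              simp only [hw, if_true, beq_self_eq_true, if_pos]
              rw [pvLkp_append, hlkpl]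
              subst hwk
              simp [pvLkp, List.find?]
            · have hbe : (kv.1 == k) = false := by simpa using hkk
              simp only [hbe, Bool.false_eq_true, if_false]
              rw [pvLkp_append]
              have : pvLkp [((k : String), (v : String))] kv.1 = none := by
                simp [pvLkp, List.find?, show (k == kv.1) = false by simpa using (Ne.symm hkk)]
              rw [this, Option.or_none]
          · have hid : ∀ q ∈ List.filter (fun kv => decide (E.contains kv.1 = false)) l,
                (fun p => if (p.1 == k) = true then ((k : String), (v : String)) else p) q = id q := by
              intro q hq
              have hqE : E.contains q.1 = false := by simpa using (List.mem_filter.mp hq).2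
              have hqk : (q.1 == k) = false := by
                simp only [beq_eq_false_iff_ne, ne_eq]
                intro hcon
                rw [hcon, hEc] at hqE
                cases hqE
              simp [hqk]
            rw [List.map_congr_left hid, List.map_id]
        · -- already translated: no write
          rw [if_neg (by rw [hcond]; exact hw)]
          rw [ihl]
          simp only [pvCanon, List.filter_append, hfilterp, List.append_nil]
          congr 1
          apply List.map_congr_left
          intro kv hkv'
          by_cases hkk : kv.1 = k
          · have hkv2 : (k, kv.2) ∈ E.items := by
              obtain ⟨a, b⟩ := kv
              cases hkk
              exact hkv'
            have h1 := pvFind?_of_mem_nodup E.items k kv.2 hkv2 hE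
            rw [hfind] at h1
            have hw2 : kv.2 = w := congrArg Prod.snd (Option.some.inj h1).symm
            have hkv_eq : kv = (k, w) := Prod.ext hkk hw2
            rw [hkv_eq]
            simp [hw]
          · rw [pvLkp_append]
            have : pvLkp [((k : String), (v : String))] kv.1 = none := by
              simp [pvLkp, List.find?, show (k == kv.1) = false by simpa using (Ne.symm hkk)]
            rw [this, Option.or_none]
      · -- new key: appended at the end
        have hEc' : E.contains k = false := by
          cases h : E.contains k
          · rfl
          · exact absurd h hEc
        have hkE : k ∉ E.items.map Prod.fst := by
          intro hcon
          rw [pvContains_eq] at hEc'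
          exact absurd hcon (of_decide_eq_false hEc')
        have hlkpC : pvLkp (pvCanon E l) k = none := by
          apply pvLkp_eq_none
          rw [pvCanon_fst]
          intro hcon
          rcases List.mem_append.mp hcon with hcon | hcon
          · exact hkE hcon
          · obtain ⟨q, hq, hqk⟩ := List.mem_map.mp hcon
            exact hknotl (List.mem_map.mpr ⟨q, (List.mem_filter.mp hq).1, hqk⟩)
        have hcond : (M.getD k k == k) = true := by rw [hgetD, hlkpC]; simp
        rw [if_pos hcond]
        have hMc : M.contains k = false := by
          rw [pvContains_eq, hkeysM]
          apply decide_eq_false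
          intro hcon
          rcases List.mem_append.mp hcon with hcon | hcon
          · exact hkE hcon
          · obtain ⟨q, hq, hqk⟩ := List.mem_map.mp hcon
            exact hknotl (List.mem_map.mpr ⟨q, (List.mem_filter.mp hq).1, hqk⟩)
        rw [PySem.Dict.items_insert_of_not_contains (h := hMc), ihl]
        simp only [pvCanon, List.filter_append, List.append_assoc]
        congr 1
        · apply List.map_congr_left
          intro kv hkv'
          have hkk : kv.1 ≠ k := fun hcon => hkE (hcon ▸ List.mem_map.mpr ⟨kv, hkv', rfl⟩)
          rw [pvLkp_append]
          have : pvLkp [((k : String), (v : String))] kv.1 = none := by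
            simp [pvLkp, List.find?, show (k == kv.1) = false by simpa using (Ne.symm hkk)]
          rw [this, Option.or_none]
        · congr 1
          simp [hEc']

theorem pvB_merged (E U : PySem.Dict String String)
    (hE : (E.items.map Prod.fst).Nodup) (hu : (U.items.map Prod.fst).Nodup) :
    (U.items.foldl (fun m kv => if m.contains kv.1 then m else m.insert kv.1 kv.2)
      (E.items.foldl
        (fun m kv => m.insert kv.1 (if U.contains kv.1 && (kv.2 == kv.1) then U.getD kv.1 kv.2 else kv.2))
        (PySem.Dict.empty : PySem.Dict String String))).items
      = pvCanon E U.items := by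
  -- phase 1: the comprehension over existing
  have hUlkp : ∀ k, U.get? k = pvLkp U.items k := fun k => pvGet?_eq_lkp U k
  have hphase1 : (E.items.foldl
      (fun m kv => m.insert kv.1 (if U.contains kv.1 && (kv.2 == kv.1) then U.getD kv.1 kv.2 else kv.2))
      (PySem.Dict.empty : PySem.Dict String String)).items
      = E.items.map (fun kv => (kv.1, if kv.2 == kv.1 then (pvLkp U.items kv.1).getD kv.2 else kv.2)) := by
    rw [PySem.Dict.items_foldl_insert_fresh E.items (fun kv => kv.1)
      (fun kv => if U.contains kv.1 && (kv.2 == kv.1) then U.getD kv.1 kv.2 else kv.2)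
      PySem.Dict.empty (fun a _ => PySem.Dict.contains_empty _) hE]
    rw [show (PySem.Dict.empty : PySem.Dict String String).items = [] from rfl, List.nil_append]
    apply List.map_congr_left
    intro kv _
    by_cases hv : (kv.2 == kv.1) = true
    · by_cases hc : U.contains kv.1 = true
      · rw [hv, hc]
        simp only [Bool.and_self, if_true]
        rw [PySem.Dict.getD_eq_get?_getD, hUlkp kv.1]
      · have hc' : U.contains kv.1 = false := by cases h : U.contains kv.1; rfl; exact absurd h hc
        have hnone : U.get? kv.1 = none := by
          rw [PySem.Dict.get?_eq_none_iff_contains]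
          exact hc'
        rw [hUlkp kv.1] at hnone
        rw [hc', hv, hnone]
        simp
    · have hv' : (kv.2 == kv.1) = false := by cases h : (kv.2 == kv.1); rfl; exact absurd h hv
      rw [hv']
      simp
  -- phase 2: append the missing update keys
  have hkeys1 : (E.items.foldl
      (fun m kv => m.insert kv.1 (if U.contains kv.1 && (kv.2 == kv.1) then U.getD kv.1 kv.2 else kv.2))
      (PySem.Dict.empty : PySem.Dict String String)).items.map Prod.fst = E.items.map Prod.fst := by
    rw [hphase1, List.map_map]
    rfl
  set M0 := E.items.foldl
      (fun m kv => m.insert kv.1 (if U.contains kv.1 && (kv.2 == kv.1) then U.getD kv.1 kv.2 else kv.2))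
      (PySem.Dict.empty : PySem.Dict String String) with hM0
  -- fold over any prefix of distinct fresh keys
  have main : ∀ l : List (String × String), (l.map Prod.fst).Nodup →
      (l.foldl (fun m kv => if m.contains kv.1 then m else m.insert kv.1 kv.2) M0).items
        = M0.items ++ l.filter (fun kv => E.contains kv.1 = false) := by
    intro l hnd
    induction l using List.reverseRecOn with
    | nil => simp
    | append_singleton l p ih =>
        have hl : (l.map Prod.fst).Nodup := by
          rw [List.map_append] at hnd
          exact hnd.of_append_left
        have hpnotl : p.1 ∉ l.map Prod.fst := by
          rw [List.map_append, List.nodup_append] at hnd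
          intro hcon
          exact hnd.2.2 p.1 hcon p.1 (by simp) rfl
        have ihl := ih hl
        rw [List.foldl_append, List.foldl_cons, List.foldl_nil]
        set M := l.foldl (fun m kv => if m.contains kv.1 then m else m.insert kv.1 kv.2) M0 with hMd
        have hkeysM : M.items.map Prod.fst
            = E.items.map Prod.fst ++ (l.filter (fun kv => E.contains kv.1 = false)).map Prod.fst := by
          rw [ihl, List.map_append, hkeys1]
        have hcontains : M.contains p.1 = E.contains p.1 := by
          rw [pvContains_eq, pvContains_eq, hkeysM]
          by_cases hc : p.1 ∈ E.items.map Prod.fst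
          · simp [hc]
          · have h2 : p.1 ∉ (l.filter (fun kv => E.contains kv.1 = false)).map Prod.fst := by
              intro hcon
              obtain ⟨q, hq, hqk⟩ := List.mem_map.mp hcon
              exact hpnotl (List.mem_map.mpr ⟨q, (List.mem_filter.mp hq).1, hqk⟩)
            have hA : p.1 ∉ (E.items.map Prod.fst ++ (l.filter (fun kv => E.contains kv.1 = false)).map Prod.fst) := by
              intro hcon
              rcases List.mem_append.mp hcon with h | h
              · exact hc h
              · exact h2 h
            rw [decide_eq_false hA, decide_eq_false hc]
        by_cases hEc : E.contains p.1 = true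
        · rw [if_pos (by rw [hcontains]; exact hEc), ihl]
          have : List.filter (fun kv => decide (E.contains kv.1 = false)) [p] = [] := by
            simp [hEc]
          rw [List.filter_append, this, List.append_nil]
        · have hEc' : E.contains p.1 = false := by cases h : E.contains p.1; rfl; exact absurd h hEc
          rw [if_neg (by rw [hcontains, hEc']; exact Bool.false_ne_true)]
          have hMc : M.contains p.1 = false := by rw [hcontains]; exact hEc'
          rw [PySem.Dict.items_insert_of_not_contains (h := hMc), ihl]
          have : List.filter (fun kv => decide (E.contains kv.1 = false)) [p] = [p] := by
            simp [hEc']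
          rw [List.filter_append, this, List.append_assoc]
  rw [main U.items hu, hphase1, pvCanon]


theorem pvFold_get? (el : List (Int × String)) (k : String) (i : Int)
    (h : ((el.foldl (fun d p => d.insert p.2 p.1) (PySem.Dict.empty : PySem.Dict String Int)).get? k) = some i) :
    (i, k) ∈ el := by
  induction el using List.reverseRecOn with
  | nil => simp [PySem.Dict.get?_empty] at h
  | append_singleton l q ih =>
      rw [List.foldl_append, List.foldl_cons, List.foldl_nil, PySem.Dict.get?_insert] at h
      by_cases hk : k = q.2
      · rw [if_pos hk] at h
        obtain rfl := Option.some.inj h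
        simp [hk]
      · rw [if_neg hk] at h
        exact List.mem_append_left _ (ih h)

theorem pvPos_get? (source_order : List String) (k : String) (i : Int)
    (h : ((PySem.List.enumerate source_order 0).foldl
      (fun d p => d.insert p.2 p.1) (PySem.Dict.empty : PySem.Dict String Int)).get? k = some i) :
    ∃ j : Nat, j < source_order.length ∧ (i : Int) = j ∧ source_order[j]? = some k := by
  have hmem := pvFold_get? _ _ _ h
  rw [PySem.List.mem_enumerate_iff] at hmem
  obtain ⟨j, hj, hp⟩ := hmem
  have h1 : i = (0 : Int) + j := congrArg Prod.fst hp
  have h2 : k = source_order[j] := congrArg Prod.snd hp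
  exact ⟨j, hj, by omega, by simp [h2.symm, hj]⟩


theorem pvInsertBy_cons (p : (String × String) → (String × String) → Bool) (x y : String × String) (ys : List (String × String)) :
    PySem.List.insertBy p x (y :: ys) = if p x y then x :: y :: ys else y :: PySem.List.insertBy p x ys := rfl

theorem pvInsertBy_last (p : (String × String) → (String × String) → Bool) (x : String × String)
    (L : List (String × String)) (h : ∀ y ∈ L, p x y = false) :
    PySem.List.insertBy p x L = L ++ [x] := by
  induction L with
  | nil => rfl
  | cons a t ih =>
      have ha := h a (by simp)
      simp only [pvInsertBy_cons, ha, Bool.false_eq_true, if_false, List.cons_append]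
      rw [ih (fun y hy => h y (by simp [hy]))]

theorem pvInsertBy_skip (p : (String × String) → (String × String) → Bool) (x : String × String)
    (L1 L2 : List (String × String)) (h : ∀ y ∈ L1, p x y = false) :
    PySem.List.insertBy p x (L1 ++ L2) = L1 ++ PySem.List.insertBy p x L2 := by
  induction L1 with
  | nil => rfl
  | cons a t ih =>
      have ha := h a (by simp)
      simp only [List.cons_append, pvInsertBy_cons, ha, Bool.false_eq_true, if_false]
      rw [ih (fun y hy => h y (by simp [hy]))]

theorem pvInsertBy_front (p : (String × String) → (String × String) → Bool) (x : String × String)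
    (L : List (String × String)) (h : ∀ y ∈ L, p x y = true) :
    PySem.List.insertBy p x L = x :: L := by
  cases L with
  | nil => rfl
  | cons a t => simp [pvInsertBy_cons, h a (by simp)]

-- the groups of elements with key s, s+1, …, s+m-1, in order
def pvGroups (keyf : (String × String) → Int) (l : List (String × String)) (s : Nat) : Nat → List (String × String)
  | 0 => []
  | m + 1 => l.filter (fun x => keyf x == Int.ofNat s) ++ pvGroups keyf l (s + 1) m

def pvG (keyf : (String × String) → Int) (n : Nat) (l : List (String × String)) : List (String × String) :=
  pvGroups keyf l 0 n ++ l.filter (fun x => keyf x == Int.ofNat n)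

theorem pvMem_groups (keyf : (String × String) → Int) (l : List (String × String))
    (m : Nat) (s : Nat) (y : String × String) (hy : y ∈ pvGroups keyf l s m) :
    ∃ i : Nat, s ≤ i ∧ i < s + m ∧ keyf y = Int.ofNat i := by
  induction m generalizing s with
  | zero => simp [pvGroups] at hy
  | succ m ih =>
      rcases List.mem_append.mp hy with hy | hy
      · have := (List.mem_filter.mp hy).2
        rw [beq_iff_eq] at this
        exact ⟨s, le_refl s, by omega, this⟩
      · obtain ⟨i, h1, h2, h3⟩ := ih (s + 1) hy
        exact ⟨i, by omega, by omega, h3⟩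

theorem pvGroups_split (keyf : (String × String) → Int) (l : List (String × String))
    (m1 m2 : Nat) (s : Nat) :
    pvGroups keyf l s (m1 + m2) = pvGroups keyf l s m1 ++ pvGroups keyf l (s + m1) m2 := by
  induction m1 generalizing s with
  | zero => simp [pvGroups]
  | succ m1 ih =>
      have : m1 + 1 + m2 = (m1 + m2) + 1 := by omega
      rw [this]
      simp only [pvGroups, ih (s + 1), List.append_assoc]
      rw [show s + 1 + m1 = s + (m1 + 1) by omega]

theorem pvGroups_congr (keyf : (String × String) → Int) (l l' : List (String × String))
    (m : Nat) (s : Nat)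
    (h : ∀ i : Nat, s ≤ i → i < s + m → l.filter (fun x => keyf x == Int.ofNat i) = l'.filter (fun x => keyf x == Int.ofNat i)) :
    pvGroups keyf l s m = pvGroups keyf l' s m := by
  induction m generalizing s with
  | zero => simp [pvGroups]
  | succ m ih =>
      simp only [pvGroups]
      rw [h s (le_refl s) (by omega), ih (s + 1) (fun i h1 h2 => h i (by omega) (by omega))]

theorem pvFilter_append_singleton_ne (keyf : (String × String) → Int) (l : List (String × String))
    (x : String × String) (c : Int) (h : (keyf x == c) = false) :
    (l ++ [x]).filter (fun z => keyf z == c) = l.filter (fun z => keyf z == c) := by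
  rw [List.filter_append]; simp [h]

theorem pvFilter_append_singleton_eq (keyf : (String × String) → Int) (l : List (String × String))
    (x : String × String) (c : Int) (h : (keyf x == c) = true) :
    (l ++ [x]).filter (fun z => keyf z == c) = l.filter (fun z => keyf z == c) ++ [x] := by
  rw [List.filter_append]; simp [h]

theorem pvSorted_eq_groups (keyf : (String × String) → Int) (n : Nat) (l : List (String × String))
    (hb : ∀ x ∈ l, keyf x = Int.ofNat n ∨ ∃ j : Nat, j < n ∧ keyf x = Int.ofNat j) :
    PySem.List.sorted l keyf false = pvG keyf n l := by
  induction l using List.reverseRecOn with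
  | nil =>
      have hnil : ∀ (m s : Nat), pvGroups keyf ([] : List (String × String)) s m = [] := by
        intro m
        induction m with
        | zero => intro s; rfl
        | succ m ihm => intro s; simp [pvGroups, ihm]
      simp [pvG, PySem.List.sorted_eq_nil_iff, hnil]
  | append_singleton l x ih =>
      have ihl := ih (fun y hy => hb y (List.mem_append_left _ hy))
      rw [PySem.List.sorted_eq_foldl_insertBy, List.foldl_append, List.foldl_cons, List.foldl_nil,
        ← PySem.List.sorted_eq_foldl_insertBy, ihl]
      set p : (String × String) → (String × String) → Bool := fun a b => decide (keyf a < keyf b) with hp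
      rcases hb x (by simp) with hx | ⟨j, hj, hx⟩
      · -- keyf x = n : lands at the very end
        have hall : ∀ y ∈ pvG keyf n l, p x y = false := by
          intro y hy
          rcases List.mem_append.mp hy with hy | hy
          · obtain ⟨i, _, h2, h3⟩ := pvMem_groups keyf l n 0 y hy
            simp only [hp, hx, h3, decide_eq_false_iff_not, not_lt, Int.ofNat_eq_natCast]
            exact_mod_cast Nat.le_of_lt (by omega)
          · have := (List.mem_filter.mp hy).2
            rw [beq_iff_eq] at this
            simp [hp, hx, this]
        rw [pvInsertBy_last p x _ hall]
        simp only [pvG]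
        rw [pvGroups_congr keyf (l ++ [x]) l n 0 (fun i _ h2 => pvFilter_append_singleton_ne keyf l x _ (by
          simp only [hx, beq_eq_false_iff_ne, ne_eq, Int.ofNat_eq_natCast]
          intro hcon; exact absurd (by exact_mod_cast hcon) (by omega)))]
        rw [pvFilter_append_singleton_eq keyf l x _ (by simp [hx]), ← List.append_assoc]
      · -- keyf x = j < n : lands at the end of group j
        have hsplit : ∀ l' : List (String × String), pvGroups keyf l' 0 n
            = pvGroups keyf l' 0 j ++ (l'.filter (fun z => keyf z == Int.ofNat j) ++ pvGroups keyf l' (j + 1) (n - j - 1)) := by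
          intro l'
          conv_lhs => rw [show n = j + (1 + (n - j - 1)) by omega]
          rw [pvGroups_split, pvGroups_split]
          simp only [pvGroups, List.append_nil, Nat.zero_add, List.append_assoc]
        have h1 : ∀ y ∈ pvGroups keyf l 0 j ++ l.filter (fun z => keyf z == Int.ofNat j), p x y = false := by
          intro y hy
          rcases List.mem_append.mp hy with hy | hy
          · obtain ⟨i, _, h2, h3⟩ := pvMem_groups keyf l j 0 y hy
            simp only [hp, hx, h3, decide_eq_false_iff_not, not_lt, Int.ofNat_eq_natCast]
            exact_mod_cast Nat.le_of_lt (by omega)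
          · have := (List.mem_filter.mp hy).2
            rw [beq_iff_eq] at this
            simp [hp, hx, this]
        have h2 : ∀ y ∈ pvGroups keyf l (j + 1) (n - j - 1) ++ l.filter (fun z => keyf z == Int.ofNat n), p x y = true := by
          intro y hy
          rcases List.mem_append.mp hy with hy | hy
          · obtain ⟨i, hi1, _, h3⟩ := pvMem_groups keyf l (n - j - 1) (j + 1) y hy
            simp only [hp, hx, h3, decide_eq_true_eq, Int.ofNat_eq_natCast]
            exact_mod_cast (by omega : j < i)
          · have := (List.mem_filter.mp hy).2
            rw [beq_iff_eq] at this
            simp only [hp, hx, this, decide_eq_true_eq, Int.ofNat_eq_natCast]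
            exact_mod_cast hj
        have lhs_eq : pvG keyf n l
            = (pvGroups keyf l 0 j ++ l.filter (fun z => keyf z == Int.ofNat j))
              ++ (pvGroups keyf l (j + 1) (n - j - 1) ++ l.filter (fun z => keyf z == Int.ofNat n)) := by
          simp only [pvG, hsplit l]
          simp [List.append_assoc]
        rw [lhs_eq, pvInsertBy_skip p x _ _ h1, pvInsertBy_front p x _ h2]
        simp only [pvG, hsplit (l ++ [x])]
        have hne : ∀ i : Nat, i ≠ j → (l ++ [x]).filter (fun z => keyf z == Int.ofNat i) = l.filter (fun z => keyf z == Int.ofNat i) := by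
          intro i hij
          apply pvFilter_append_singleton_ne
          simp only [hx, beq_eq_false_iff_ne, ne_eq, Int.ofNat_eq_natCast]
          intro hcon
          exact hij ((by exact_mod_cast hcon : j = i)).symm
        rw [pvGroups_congr keyf (l ++ [x]) l j 0 (fun i _ h2 => hne i (by omega)),
          pvGroups_congr keyf (l ++ [x]) l (n - j - 1) (j + 1) (fun i h1 _ => hne i (by omega)),
          pvFilter_append_singleton_eq keyf l x _ (by simp [hx]),
          pvFilter_append_singleton_ne keyf l x _ (by
            simp only [hx, beq_eq_false_iff_ne, ne_eq, Int.ofNat_eq_natCast]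
            intro hcon; exact absurd (by exact_mod_cast hcon) (by omega))]
        simp [List.append_assoc]

-- ===== slots side =====

theorem pvFilter_len_le_one_getLast? (g : List (String × String)) (hnd : g.Nodup)
    (h : ∀ a ∈ g, ∀ b ∈ g, a = b) :
    g = g.getLast?.toList := by
  match g with
  | [] => rfl
  | [a] => rfl
  | a :: b :: t =>
      have h1 : a = b := h a (by simp) b (by simp)
      exact absurd h1 (by simp at hnd; tauto)

-- filterMap of the slot spec equals the groups
theorem pvFilterMap_slots (keyf : (String × String) → Int) (l : List (String × String))
    (m s N : Nat) (hnd : l.Nodup) (hN : s + m ≤ N)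
    (huniq : ∀ x ∈ l, ∀ y ∈ l, keyf x = keyf y → keyf x ≠ Int.ofNat N → x = y) :
    ((List.range' s m).map (fun i => (l.filter (fun x => keyf x == Int.ofNat i)).getLast?)).filterMap id
      = pvGroups keyf l s m := by
  induction m generalizing s with
  | zero => rfl
  | succ m ih =>
      rw [List.range'_succ]
      simp only [List.map_cons, List.filterMap_cons]
      have hgrp : l.filter (fun x => keyf x == Int.ofNat s) = (l.filter (fun x => keyf x == Int.ofNat s)).getLast?.toList := by
        apply pvFilter_len_le_one_getLast? _ (hnd.filter _)
        intro a ha b hb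
        have ha' := List.mem_filter.mp ha
        have hb' := List.mem_filter.mp hb
        rw [beq_iff_eq] at ha' hb'
        refine huniq a ha'.1 b hb'.1 (by rw [ha'.2, hb'.2]) ?_
        rw [ha'.2]
        intro hcon
        have : s = N := by
          have := congrArg Int.toNat hcon
          simpa using this
        omega
      cases hg : (l.filter (fun x => keyf x == Int.ofNat s)).getLast? with
      | none =>
          simp only [id_eq]
          have hempty : l.filter (fun x => keyf x == Int.ofNat s) = [] := by rw [hgrp, hg]; rfl
          simp only [pvGroups, hempty, List.nil_append]
          exact ih (s + 1) (by omega)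
      | some a =>
          simp only [id_eq]
          have hsing : l.filter (fun x => keyf x == Int.ofNat s) = [a] := by rw [hgrp, hg]; rfl
          simp only [pvGroups, hsing, List.singleton_append]
          exact congrArg (List.cons a) (ih (s + 1) (by omega))

theorem pvSlots_fold (keyf : (String × String) → Int) (n : Nat) (l : List (String × String))
    (step : (List (Option (String × String)) × List (String × String)) → (String × String) → (List (Option (String × String)) × List (String × String)))
    (hstep : ∀ sr x, x ∈ l → step sr x =
      if keyf x = Int.ofNat n then (sr.1, sr.2 ++ [x]) else (sr.1.set (keyf x).toNat (some x), sr.2))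
    (hb : ∀ x ∈ l, keyf x = Int.ofNat n ∨ ∃ j : Nat, j < n ∧ keyf x = Int.ofNat j) :
    (l.foldl step (List.replicate n none, [])).1
        = (List.range' 0 n).map (fun i => (l.filter (fun x => keyf x == Int.ofNat i)).getLast?)
      ∧ (l.foldl step (List.replicate n none, [])).2
        = l.filter (fun x => keyf x == Int.ofNat n) := by
  induction l using List.reverseRecOn with
  | nil =>
      constructor
      · apply List.ext_getElem
        · simp
        · intro t h1 h2
          simp
      · rfl
  | append_singleton l x ih =>
      obtain ⟨ih1, ih2⟩ := ih (fun sr y hy => hstep sr y (List.mem_append_left _ hy))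
        (fun y hy => hb y (List.mem_append_left _ hy))
      rw [List.foldl_append, List.foldl_cons, List.foldl_nil,
        hstep _ x (List.mem_append_right _ (by simp))]
      rcases hb x (by simp) with hx | ⟨j, hj, hx⟩
      · rw [if_pos hx]
        constructor
        · rw [ih1]
          apply List.map_congr_left
          intro i hi
          rw [List.mem_range'_1] at hi
          rw [pvFilter_append_singleton_ne keyf l x _ (by
            simp only [hx, beq_eq_false_iff_ne, ne_eq, Int.ofNat_eq_natCast]
            intro hcon
            have : n = i := by
              have := congrArg Int.toNat hcon
              simpa using this
            omega)]
        · rw [ih2, pvFilter_append_singleton_eq keyf l x _ (by simp [hx])]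
      · have hxn : ¬ keyf x = Int.ofNat n := by
          rw [hx]
          intro hcon
          have : j = n := by
            have := congrArg Int.toNat hcon
            simpa using this
          omega
        rw [if_neg hxn]
        constructor
        · rw [ih1]
          apply List.ext_getElem
          · simp
          · intro t h1 h2
            rw [List.length_set, List.length_map, List.length_range'] at h1
            have htj : (keyf x).toNat = j := by rw [hx]; simp
            rw [List.getElem_set, List.getElem_map, List.getElem_map, List.getElem_range']
            simp only [Nat.zero_add, htj]
            by_cases hcase : j = t
            · rw [if_pos hcase]
              subst hcase
              rw [pvFilter_append_singleton_eq keyf l x _ (by simp [hx])]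
              simp
            · rw [if_neg hcase]
              rw [pvFilter_append_singleton_ne keyf l x _ (by
                simp only [hx, beq_eq_false_iff_ne, ne_eq, Int.ofNat_eq_natCast]
                intro hcon
                exact hcase (by
                  have := congrArg Int.toNat hcon
                  simpa using this))]
        · rw [ih2, pvFilter_append_singleton_ne keyf l x _ (by
            simp only [hx, beq_eq_false_iff_ne, ne_eq, Int.ofNat_eq_natCast]
            intro hcon
            refine hxn ?_
            rw [hx]
            simp only [Int.ofNat_eq_natCast]
            exact_mod_cast hcon)]


theorem pvCanon_keys_nodup (E U : PySem.Dict String String)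
    (hE : (E.items.map Prod.fst).Nodup) (hu : (U.items.map Prod.fst).Nodup) :
    ((pvCanon E U.items).map Prod.fst).Nodup := by
  rw [pvCanon_fst, List.nodup_append]
  refine ⟨hE, ?_, ?_⟩
  · exact List.Nodup.sublist (List.Sublist.map Prod.fst List.filter_sublist) hu
  · intro a ha b hb
    intro hcon
    subst hcon
    obtain ⟨q, hq, hqk⟩ := List.mem_map.mp hb
    have hqE : E.contains q.1 = false := by simpa using (List.mem_filter.mp hq).2
    rw [pvContains_eq] at hqE
    have : q.1 ∈ E.items.map Prod.fst := hqk ▸ ha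
    simpa [this] using hqE

-- ===== VERDICT (by name: the statement is the Claim_ definition above) =====
theorem ordered_merge_spec : Claim_equal_ordered_merge := by
  intro existing updates source_order _dom
  unfold Spec_ordered_merge ordered_merge ordered_merge_alt
  set E := PySem.Dict.ofList existing with hEdef
  set U := PySem.Dict.ofList updates with hUdef
  set n := source_order.length with hn
  set pos := (PySem.List.enumerate source_order 0).foldl
    (fun d p => d.insert p.2 p.1) (PySem.Dict.empty : PySem.Dict String Int) with hpos
  have hE : (E.items.map Prod.fst).Nodup := PySem.Dict.nodup_keys_ofList existing
  have hu : (U.items.map Prod.fst).Nodup := PySem.Dict.nodup_keys_ofList updates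
  have hmiA := pvA_merged E U.items hE hu
  have hmiB := pvB_merged E U hE hu
  set mi := pvCanon E U.items with hmi
  have hndk : (mi.map Prod.fst).Nodup := pvCanon_keys_nodup E U hE hu
  have hndmi : mi.Nodup := hndk.of_map
  set keyf : (String × String) → Int := fun kv => pos.getD kv.1 (n : Int) with hkeyf
  -- key classification
  have hkey : ∀ x : String × String,
      (pos.get? x.1 = none ∧ keyf x = Int.ofNat n)
      ∨ ∃ j : Nat, j < n ∧ pos.get? x.1 = some (Int.ofNat j) ∧ keyf x = Int.ofNat j
        ∧ source_order[j]? = some x.1 := by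
    intro x
    cases hg : pos.get? x.1 with
    | none =>
        left
        refine ⟨rfl, ?_⟩
        rw [hkeyf]
        simp only [PySem.Dict.getD_eq_get?_getD, hg, Option.getD_none]
        rfl
    | some i =>
        obtain ⟨j, hj, hij, hsrc⟩ := pvPos_get? source_order x.1 i hg
        right
        refine ⟨j, hj, ?_, ?_, hsrc⟩
        · exact congrArg some (by exact_mod_cast hij)
        · rw [hkeyf]
          simp only [PySem.Dict.getD_eq_get?_getD, hg, Option.getD_some]
          rw [hij]; rfl
  have hb : ∀ x ∈ mi, keyf x = Int.ofNat n ∨ ∃ j : Nat, j < n ∧ keyf x = Int.ofNat j := by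
    intro x _
    rcases hkey x with ⟨_, hk⟩ | ⟨j, hj, _, hk, _⟩
    · exact Or.inl hk
    · exact Or.inr ⟨j, hj, hk⟩
  have huniq : ∀ x ∈ mi, ∀ y ∈ mi, keyf x = keyf y → keyf x ≠ Int.ofNat n → x = y := by
    intro x hx y hy heq hne
    rcases hkey x with ⟨_, hk⟩ | ⟨j, hj, _, hk, hs⟩
    · exact absurd hk hne
    rcases hkey y with ⟨_, hk'⟩ | ⟨j', hj', _, hk', hs'⟩
    · rw [heq] at hne; exact absurd hk' hne
    have hjj : j = j' := by
      rw [hk, hk'] at heq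
      have := congrArg Int.toNat heq
      simpa using this
    subst hjj
    rw [hs] at hs'
    have hxy : x.1 = y.1 := Option.some.inj hs'
    obtain ⟨x1, x2⟩ := x
    obtain ⟨y1, y2⟩ := y
    obtain rfl : x1 = y1 := hxy
    have f1 := pvFind?_of_mem_nodup mi x1 x2 hx hndk
    have f2 := pvFind?_of_mem_nodup mi x1 y2 hy hndk
    rw [f1] at f2
    exact Option.some.inj f2
  -- the sort side
  have hsort := pvSorted_eq_groups keyf n mi hb
  -- the slots side
  set step : (List (Option (String × String)) × List (String × String)) → (String × String) → (List (Option (String × String)) × List (String × String)) :=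
    fun sr kv =>
      match pos.get? kv.1 with
      | none => (sr.1, sr.2 ++ [kv])
      | some i => (sr.1.set i.toNat (some kv), sr.2) with hstepdef
  have hstep : ∀ sr x, x ∈ mi → step sr x =
      if keyf x = Int.ofNat n then (sr.1, sr.2 ++ [x]) else (sr.1.set (keyf x).toNat (some x), sr.2) := by
    intro sr x _
    rcases hkey x with ⟨hg, hk⟩ | ⟨j, hj, hg, hk, _⟩
    · rw [hstepdef]
      simp only [hg]
      rw [if_pos hk]
    · rw [hstepdef]
      simp only [hg]
      rw [if_neg (by
        rw [hk]
        intro hcon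
        have : j = n := by
          have := congrArg Int.toNat hcon
          simpa using this
        omega)]
      rw [hk]
  obtain ⟨hs1, hs2⟩ := pvSlots_fold keyf n mi step hstep hb
  have hfm := pvFilterMap_slots keyf mi n 0 n hndmi (by omega) huniq
  have hfinal : PySem.List.sorted mi keyf false
      = (mi.foldl step (List.replicate n none, [])).1.filterMap id
        ++ (mi.foldl step (List.replicate n none, [])).2 := by
    rw [hsort, hs1, hs2, hfm, pvG]
  simp only [hmiA, hmiB]
  exact congrArg (fun z => (PySem.Dict.ofList z).items) hfinal
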